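-- pv_equiv track=rewrite | github.com/piagsand/EuroCards | api/test_python_docx.py | format_list_by_country
-- ===== SOURCE A (Python) =====
-- from collections import defaultdict
--
-- def format_list_by_country(card_list, country_codes):
--     """Groupe et formate les cartes par préfixe de pays et ajoute les cartes non reconnues à une catégorie spéciale."""
--     country_dict = defaultdict(list)
--     special_cards = []
--
--     for card in card_list:
--         prefix = card.split('-')[0]
--         if prefix in country_codes:
--             country_dict[country_codes[prefix]].append(card)
--         else:
--             special_cards.append(card)
--
--     if special_cards:
--         country_dict["Cartes spéciales"] = special_cards
--
--     formatted_list = []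
--     for country, cards in sorted(country_dict.items(), key=lambda x: x[0] != "Cartes spéciales"):
--         formatted_cards = " / ".join(cards)
--         formatted_list.append((country, formatted_cards))  # Assurez-vous que ceci est un tuple de deux éléments
--
--     return formatted_list
-- ===== SOURCE B (Python) =====
-- def format_list_by_country(card_list, country_codes):
--     """Groupe et formate les cartes par prefixe de pays; une seule passe, pas de tri:
--     les chaines formatees sont construites au fil de l'eau et l'entree speciale est prefixee."""
--     groups = {}  # country -> already-formatted string, in first-insertion order
--     special = None
--     for card in card_list:
--         prefix = card.split('-')[0]
--         if prefix in country_codes: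
--             c = country_codes[prefix]
--             groups[c] = groups[c] + " / " + card if c in groups else card
--         else:
--             special = special + " / " + card if special is not None else card
--     result = [("Cartes spéciales", special)] if special is not None else []
--     result.extend(groups.items())
--     return result
-- ===== Notes on version B (the rewrite author's own statement) =====
-- stated objective: simpler
-- what changed: One pass that builds each country's formatted string incrementally (and the special string separately), then prepends the special entry, replacing the defaultdict-of-lists, the join pass and the stable boolean-key sort; it trades large-input speed (repeated string concatenation) for a shorter single-pass shape.
import Mathlib
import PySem

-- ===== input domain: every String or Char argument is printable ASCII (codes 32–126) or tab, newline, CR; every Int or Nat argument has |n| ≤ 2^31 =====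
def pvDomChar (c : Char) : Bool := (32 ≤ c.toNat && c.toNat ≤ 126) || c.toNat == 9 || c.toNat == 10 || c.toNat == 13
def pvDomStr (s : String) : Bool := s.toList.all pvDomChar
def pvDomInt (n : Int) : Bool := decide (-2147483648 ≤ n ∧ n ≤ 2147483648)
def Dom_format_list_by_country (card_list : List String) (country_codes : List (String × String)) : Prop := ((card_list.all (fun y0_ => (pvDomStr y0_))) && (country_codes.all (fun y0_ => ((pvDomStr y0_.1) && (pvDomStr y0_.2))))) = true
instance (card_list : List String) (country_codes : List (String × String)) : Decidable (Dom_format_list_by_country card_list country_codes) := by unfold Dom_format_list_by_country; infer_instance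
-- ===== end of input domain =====

-- B builds each country's formatted string in the single grouping pass and prepends the
-- special entry, replacing A's defaultdict-of-lists + join pass + stable boolean-key sort.

-- ===== PORT A =====
-- card.split('-')[0]: '-' is a nonempty separator so the split is never empty and [0] is its head
def fbcPrefix (card : String) : String :=
  match PySem.Str.split? card "-" with
  | some parts => parts.headD ""
  | none => ""  -- unreachable: the separator "-" is nonempty

def format_list_by_country (card_list : List String) (country_codes : List (String × String)) : List (String × String) :=
  let cc : PySem.Dict String String := PySem.Dict.ofList country_codes
  let st := card_list.foldl
    (fun (s : PySem.Dict String (List String) × List String) card =>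
      let pfx := fbcPrefix card
      if cc.contains pfx then
        (s.1.modify (cc.getD pfx "") [] (fun v => v ++ [card]), s.2)
      else
        (s.1, s.2 ++ [card]))
    (PySem.Dict.empty, [])
  let d := if st.2 ≠ [] then st.1.insert "Cartes spéciales" st.2 else st.1
  (PySem.List.sorted d.items (fun x => decide (x.1 ≠ "Cartes spéciales")) false).foldl
    (fun acc p => acc ++ [(p.1, PySem.Str.join " / " p.2)]) []

-- ===== PORT B =====
def format_list_by_country_alt (card_list : List String) (country_codes : List (String × String)) : List (String × String) :=
  let cc : PySem.Dict String String := PySem.Dict.ofList country_codes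
  let st := card_list.foldl
    (fun (s : PySem.Dict String String × Option String) card =>
      let pfx := fbcPrefix card
      match cc.get? pfx with
      | some c =>
        (s.1.insert c (match s.1.get? c with
                       | some g => g ++ " / " ++ card
                       | none => card), s.2)
      | none =>
        (s.1, some (match s.2 with
                    | some g => g ++ " / " ++ card
                    | none => card)))
    (PySem.Dict.empty, none)
  (match st.2 with
   | some sp => [("Cartes spéciales", sp)]
   | none => []) ++ st.1.items

-- ===== PRECONDITION & SPEC =====
def Spec_format_list_by_country (card_list : List String) (country_codes : List (String × String)) (out : List (String × String)) : Prop := out = format_list_by_country_alt card_list country_codes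
instance (card_list : List String) (country_codes : List (String × String)) (out : List (String × String)) : Decidable (Spec_format_list_by_country card_list country_codes out) := by unfold Spec_format_list_by_country; infer_instance

-- ===== CLAIM (what is proved, stated in full; the proofs are below) =====
def Claim_equal_format_list_by_country : Prop := ∀ (card_list : List String) (country_codes : List (String × String)), Dom_format_list_by_country card_list country_codes → Spec_format_list_by_country card_list country_codes (format_list_by_country card_list country_codes)

-- ===== LEMMAS AND PROOFS =====

-- Chars-level snoc lemma for join
theorem fbc_join_chars_snoc (sep y : List Char) (xs : List (List Char)) (h : xs ≠ []) :
    PySem.Chars.join sep (xs ++ [y]) = PySem.Chars.join sep xs ++ sep ++ y := by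
  induction xs with
  | nil => exact absurd rfl h
  | cons x t ih =>
    cases t with
    | nil => simp [PySem.Chars.join_cons_cons, PySem.Chars.join_singleton]
    | cons x2 t2 =>
      have := ih (by simp)
      simp only [List.cons_append] at this ⊢
      rw [PySem.Chars.join_cons_cons, PySem.Chars.join_cons_cons, this]
      simp [List.append_assoc]

theorem fbc_join_snoc (v : List String) (c : String) (h : v ≠ []) :
    PySem.Str.join " / " (v ++ [c]) = PySem.Str.join " / " v ++ " / " ++ c := by
  apply String.toList_inj.mp
  simp only [PySem.Str.toList_join, List.map_append, List.map_cons, List.map_nil, String.toList_append]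
  rw [fbc_join_chars_snoc _ _ _ (by simp [h])]

theorem fbc_join_singleton (c : String) : PySem.Str.join " / " [c] = c := by
  apply String.toList_inj.mp
  simp [PySem.Str.toList_join, PySem.Chars.join_singleton]

def fbcF (p : String × List String) : String × String := (p.1, PySem.Str.join " / " p.2)

theorem fbc_contains_mk_map (l : List (String × List String)) (k : String) :
    (PySem.Dict.mk (l.map fbcF)).contains k = (PySem.Dict.mk l).contains k := by
  induction l with
  | nil => rfl
  | cons p t ih => simp [fbcF, PySem.Dict.contains_mk] at ih ⊢; simp_all

theorem fbc_get?_mk_map (l : List (String × List String)) (k : String) :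
    (PySem.Dict.mk (l.map fbcF)).get? k = ((PySem.Dict.mk l).get? k).map (PySem.Str.join " / ") := by
  induction l with
  | nil => rfl
  | cons p t ih =>
    rw [List.map_cons, PySem.Dict.get?_mk_cons, PySem.Dict.get?_mk_cons]
    by_cases h : p.1 == k
    · simp [fbcF, h]
    · simp only [fbcF] at *
      simp [h, ih]

theorem fbc_items_insert_map (l : List (String × List String)) (c : String) (v : List String) :
    ((PySem.Dict.mk (l.map fbcF)).insert c (PySem.Str.join " / " v)).items
      = ((PySem.Dict.mk l).insert c v).items.map fbcF := by
  rw [PySem.Dict.items_insert, PySem.Dict.items_insert, fbc_contains_mk_map]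
  by_cases h : (PySem.Dict.mk l).contains c
  · simp only [h, if_pos]
    show (l.map fbcF).map _ = (l.map _).map fbcF
    rw [List.map_map, List.map_map]
    apply List.map_congr_left
    intro p _
    by_cases hp : p.1 == c
    all_goals simp at hp
    · simp [Function.comp, fbcF, hp]
    · simp [Function.comp, fbcF, hp]
  · simp [h, fbcF]

theorem fbc_items_foldl_insert_sub (pairs : List (String × String)) :
    ∀ (d : PySem.Dict String String) (p : String × String),
      p ∈ (pairs.foldl (fun d q => d.insert q.1 q.2) d).items → p ∈ d.items ∨ p ∈ pairs := by
  induction pairs with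
  | nil => intro d p h; exact Or.inl h
  | cons q t ih =>
    intro d p h
    rcases ih (d.insert q.1 q.2) p h with h' | h'
    · rcases (PySem.Dict.mem_items_insert _ _ _ _).mp h' with h'' | h''
      · right; simp [h'']
      · exact Or.inl h''.1
    · right; simp [h']

theorem fbc_items_ofList_sub (pairs : List (String × String)) (p : String × String)
    (h : p ∈ (PySem.Dict.ofList pairs).items) : p ∈ pairs := by
  have := fbc_items_foldl_insert_sub pairs PySem.Dict.empty p
  simp [PySem.Dict.ofList] at *
  rcases this h with h' | h'
  · simp [PySem.Dict.empty] at h'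
  · exact h'

def fbcK (p : String × List String) : Bool := decide (p.1 ≠ "Cartes spéciales")

theorem fbc_sorted_all_true (l : List (String × List String)) (h : ∀ p ∈ l, fbcK p = true) :
    PySem.List.sorted l fbcK false = l := by
  apply PySem.List.sorted_eq_self_of_pairwise
  induction l with
  | nil => exact List.Pairwise.nil
  | cons x t ih =>
    refine List.Pairwise.cons (fun b hb => ?_) (ih (fun p hp => h p (by simp [hp])))
    rw [h x (by simp), h b (by simp [hb])]

theorem fbc_sorted_snoc (l : List (String × List String)) (a : String × List String)
    (h : ∀ p ∈ l, fbcK p = true) (ha : fbcK a = false) :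
    PySem.List.sorted (l ++ [a]) fbcK false = a :: l := by
  rw [PySem.List.sorted_eq_foldl_insertBy, List.foldl_append]
  rw [← PySem.List.sorted_eq_foldl_insertBy, fbc_sorted_all_true l h]
  show PySem.List.insertBy _ a l = a :: l
  cases l with
  | nil => simp [PySem.List.insertBy]
  | cons x t =>
    have hx := h x (by simp)
    simp [PySem.List.insertBy, ha, hx]

theorem fbc_foldl_append_map (l : List (String × List String)) (acc : List (String × String)) :
    l.foldl (fun acc p => acc ++ [(p.1, PySem.Str.join " / " p.2)]) acc = acc ++ l.map fbcF := by
  induction l generalizing acc with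
  | nil => simp
  | cons p t ih => simp [ih, fbcF]

theorem fbc_dom_ne_cs (s : String) (h : pvDomStr s = true) : s ≠ "Cartes spéciales" := by
  intro he; subst he; revert h; decide

def fbcStepA (cc : PySem.Dict String String)
    (s : PySem.Dict String (List String) × List String) (card : String) :
    PySem.Dict String (List String) × List String :=
  let pfx := fbcPrefix card
  if cc.contains pfx then
    (s.1.modify (cc.getD pfx "") [] (fun v => v ++ [card]), s.2)
  else
    (s.1, s.2 ++ [card])

def fbcStepB (cc : PySem.Dict String String)
    (t : PySem.Dict String String × Option String) (card : String) :
    PySem.Dict String String × Option String :=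
  let pfx := fbcPrefix card
  match cc.get? pfx with
  | some c =>
    (t.1.insert c (match t.1.get? c with
                   | some g => g ++ " / " ++ card
                   | none => card), t.2)
  | none =>
    (t.1, some (match t.2 with
                | some g => g ++ " / " ++ card
                | none => card))

def fbcInv (s : PySem.Dict String (List String) × List String)
    (t : PySem.Dict String String × Option String) : Prop :=
  t.1.items = s.1.items.map fbcF ∧
  t.2 = (if s.2 = [] then none else some (PySem.Str.join " / " s.2)) ∧
  (∀ p ∈ s.1.items, p.2 ≠ [] ∧ p.1 ≠ "Cartes spéciales")

theorem fbc_step (cc : PySem.Dict String String)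
    (hcc : ∀ k v, cc.get? k = some v → v ≠ "Cartes spéciales")
    (s : PySem.Dict String (List String) × List String)
    (t : PySem.Dict String String × Option String)
    (hinv : fbcInv s t) (card : String) :
    fbcInv (fbcStepA cc s card) (fbcStepB cc t card) := by
  obtain ⟨h1, h2, h3⟩ := hinv
  have hconta : cc.contains (fbcPrefix card) = (cc.get? (fbcPrefix card)).isSome :=
    PySem.Dict.contains_eq_isSome_get? _ _
  cases hc : cc.get? (fbcPrefix card) with
  | none =>
    have hcontf : cc.contains (fbcPrefix card) = false := by rw [hconta, hc]; rfl
    refine ⟨?_, ?_, ?_⟩ <;> simp only [fbcStepA, fbcStepB, hc, hcontf, if_neg, Bool.false_eq_true, not_false_iff]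
    · exact h1
    · by_cases hs : s.2 = []
      · rw [h2]; simp [hs, fbc_join_singleton]
      · rw [h2]; simp [hs, fbc_join_snoc s.2 card hs]
    · exact h3
  | some c =>
    have hcontt : cc.contains (fbcPrefix card) = true := by rw [hconta, hc]; rfl
    have hcne : c ≠ "Cartes spéciales" := hcc _ _ hc
    have hgetD : cc.getD (fbcPrefix card) "" = c := by
      rw [PySem.Dict.getD_eq_get?_getD, hc]; rfl
    have ht1 : t.1 = PySem.Dict.mk (s.1.items.map fbcF) := by
      apply PySem.Dict.ext; simpa using h1
    have hget : t.1.get? c = (s.1.get? c).map (PySem.Str.join " / ") := by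
      rw [ht1, fbc_get?_mk_map]
    have hmod : s.1.modify c [] (fun v => v ++ [card]) = s.1.insert c (s.1.getD c [] ++ [card]) := by
      simp [PySem.Dict.modify]
    refine ⟨?_, ?_, ?_⟩ <;> simp only [fbcStepA, fbcStepB, hc, hcontt, hgetD, if_pos, hmod]
    · cases hg : s.1.get? c with
      | some v =>
        have hv : (c, v) ∈ s.1.items := PySem.Dict.mem_items_of_get?_eq_some _ hg
        have hvne : v ≠ [] := (h3 _ hv).1
        have hDv : s.1.getD c [] = v := by rw [PySem.Dict.getD_eq_get?_getD, hg]; rfl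
        rw [hget, hg, hDv]
        show (t.1.insert c (PySem.Str.join " / " v ++ " / " ++ card)).items = _
        have hmap := fbc_items_insert_map s.1.items c (v ++ [card])
        rw [fbc_join_snoc v card hvne] at hmap
        rw [ht1]
        simpa using hmap
      | none =>
        have hDv : s.1.getD c [] = [] := by rw [PySem.Dict.getD_eq_get?_getD, hg]; rfl
        rw [hget, hg, hDv]
        show (t.1.insert c card).items = _
        have hmap := fbc_items_insert_map s.1.items c [card]
        rw [fbc_join_singleton] at hmap
        rw [ht1]
        simpa using hmap
    · exact h2
    · intro p hp
      rcases (PySem.Dict.mem_items_insert _ _ _ _).mp hp with h' | h'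
      · subst h'; exact ⟨by simp, hcne⟩
      · exact h3 _ h'.1

theorem fbc_fold (cc : PySem.Dict String String)
    (hcc : ∀ k v, cc.get? k = some v → v ≠ "Cartes spéciales") :
    ∀ (cards : List String) s t, fbcInv s t →
      fbcInv (cards.foldl (fbcStepA cc) s) (cards.foldl (fbcStepB cc) t) := by
  intro cards
  induction cards with
  | nil => intro s t h; exact h
  | cons c rest ih =>
    intro s t h
    exact ih _ _ (fbc_step cc hcc s t h c)

theorem fbc_main (card_list : List String) (country_codes : List (String × String))
    (hdom2 : ∀ q ∈ country_codes, pvDomStr q.2 = true) :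
    (PySem.List.sorted
        (if (card_list.foldl (fbcStepA (PySem.Dict.ofList country_codes)) (PySem.Dict.empty, [])).2 ≠ [] then
          (card_list.foldl (fbcStepA (PySem.Dict.ofList country_codes)) (PySem.Dict.empty, [])).1.insert
            "Cartes spéciales" (card_list.foldl (fbcStepA (PySem.Dict.ofList country_codes)) (PySem.Dict.empty, [])).2
        else (card_list.foldl (fbcStepA (PySem.Dict.ofList country_codes)) (PySem.Dict.empty, [])).1).items
        fbcK false).foldl (fun acc p => acc ++ [(p.1, PySem.Str.join " / " p.2)]) []
      = (match (card_list.foldl (fbcStepB (PySem.Dict.ofList country_codes)) (PySem.Dict.empty, none)).2 with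
         | some sp => [("Cartes spéciales", sp)]
         | none => [])
        ++ (card_list.foldl (fbcStepB (PySem.Dict.ofList country_codes)) (PySem.Dict.empty, none)).1.items := by
  set cc := PySem.Dict.ofList country_codes with hccdef
  have hcc : ∀ k v, cc.get? k = some v → v ≠ "Cartes spéciales" := by
    intro k v h
    have hm := PySem.Dict.mem_items_of_get?_eq_some _ h
    have hin := fbc_items_ofList_sub country_codes _ hm
    exact fbc_dom_ne_cs _ (hdom2 _ hin)
  have hinv := fbc_fold cc hcc card_list (PySem.Dict.empty, []) (PySem.Dict.empty, none)
    ⟨rfl, rfl, by intro p hp; simp [PySem.Dict.empty] at hp⟩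
  set sA := card_list.foldl (fbcStepA cc) (PySem.Dict.empty, []) with hsA
  set tB := card_list.foldl (fbcStepB cc) (PySem.Dict.empty, none) with htB
  obtain ⟨h1, h2, h3⟩ := hinv
  have hkeys : ∀ p ∈ sA.1.items, fbcK p = true := by
    intro p hp; simp [fbcK, (h3 p hp).2]
  by_cases hs : sA.2 = []
  · rw [if_neg (by simp [hs]), h2, if_pos hs]
    rw [fbc_sorted_all_true _ hkeys, fbc_foldl_append_map, ← h1]
  · rw [if_pos hs, h2, if_neg hs]
    have hnc : ("Cartes spéciales" : String) ∉ sA.1.keys := by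
      intro hmem
      simp only [PySem.Dict.keys] at hmem
      obtain ⟨p, hp, hfst⟩ := List.mem_map.mp hmem
      exact (h3 p hp).2 hfst
    have hitems : (sA.1.insert "Cartes spéciales" sA.2).items = sA.1.items ++ [("Cartes spéciales", sA.2)] := by
      apply PySem.Dict.items_insert_of_not_contains
      rw [PySem.Dict.contains_eq_decide_mem_keys]
      simpa using hnc
    rw [hitems, fbc_sorted_snoc _ _ hkeys (by simp [fbcK]), fbc_foldl_append_map]
    simp only [List.map_cons, ← h1, List.nil_append]
    rfl


-- the two ports, written out with named step functions (definitional equalities)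
theorem fbc_A_char (card_list : List String) (country_codes : List (String × String)) :
    format_list_by_country card_list country_codes =
      (PySem.List.sorted
        (if (card_list.foldl (fbcStepA (PySem.Dict.ofList country_codes)) (PySem.Dict.empty, [])).2 ≠ [] then
          (card_list.foldl (fbcStepA (PySem.Dict.ofList country_codes)) (PySem.Dict.empty, [])).1.insert
            "Cartes spéciales" (card_list.foldl (fbcStepA (PySem.Dict.ofList country_codes)) (PySem.Dict.empty, [])).2
        else (card_list.foldl (fbcStepA (PySem.Dict.ofList country_codes)) (PySem.Dict.empty, [])).1).items
        fbcK false).foldl (fun acc p => acc ++ [(p.1, PySem.Str.join " / " p.2)]) [] := rfl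

theorem fbc_B_char (card_list : List String) (country_codes : List (String × String)) :
    format_list_by_country_alt card_list country_codes =
      (match (card_list.foldl (fbcStepB (PySem.Dict.ofList country_codes)) (PySem.Dict.empty, none)).2 with
       | some sp => [("Cartes spéciales", sp)]
       | none => [])
      ++ (card_list.foldl (fbcStepB (PySem.Dict.ofList country_codes)) (PySem.Dict.empty, none)).1.items := rfl
-- ===== VERDICT (by name: the statement is the Claim_ definition above) =====
theorem format_list_by_country_spec : Claim_equal_format_list_by_country := by
  intro card_list country_codes hdom
  have hdom2 : ∀ q ∈ country_codes, pvDomStr q.2 = true := by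
    unfold Dom_format_list_by_country at hdom
    simp only [Bool.and_eq_true, List.all_eq_true] at hdom
    intro q hq
    exact (hdom.2 q hq).2
  show format_list_by_country card_list country_codes = format_list_by_country_alt card_list country_codes
  rw [fbc_A_char, fbc_B_char]
  exact fbc_main card_list country_codes hdom2
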